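-- pv_equiv track=rewrite | github.com/Vishnuprasadvbhat/dsa_python | Searching Algos/Binary_search/binary_search_recur.py | occurences
-- ===== SOURCE A (Python) =====
-- def binary_recursive(arr,left,right,number):
--     # if right<left:
--     #     return -1
--
--     mid = left + right // 2
--
--     if (mid >= len(arr)) or (mid < 0) :
--         return -1
--
--     mid_num = arr[mid]
--
--     if mid_num == number:
--         return mid
--
--     if mid_num < number:
--         return binary_recursive(arr,mid+1,right,number)
--     else:
--         return binary_recursive(arr,left,mid-1,number)
--
--
--
--     return mid
--
-- def occurences(arr,number):
--     index = binary_recursive(arr,0,0,number)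
--
--     indices = []
--
--     # i = index - 1
--     # while (i >= 0):
--     #     if arr[i] == number:
--     #         indices.append(i)
--     #     else:
--     #         break
--     #     i = i - 1
--
--     i = index
--     while (i< len(arr)):
--         if arr[i] == number:
--             indices.append(i)
--         else:
--             break
--         i = i  + 1
--
--
--
--     return indices
-- ===== SOURCE B (Python) =====
-- def occurences(arr, number):
--     start = next((i for i, v in enumerate(arr) if v >= number), len(arr))
--     run = next((k for k, v in enumerate(arr[start:]) if v != number), len(arr) - start)
--     return list(range(start, start + run))
-- ===== Notes on version B (the rewrite author's own statement) =====
-- stated objective: simpler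
-- what changed: Replaces the recursive sentinel search plus the index while-loop with two generator-based next(...) searches over enumerate (first index with v >= number, then length of the run of number in the tail slice) and a single list(range(start, start+run)); no recursion, no -1 sentinel, no while loops.
-- intended difference: On non-empty arrays whose first element exceeds number but whose last element equals number, A's failed search returns index -1 and the negative-index wraparound in its collection loop makes A return [-1]; B returns [], the intended value since -1 is not an occurrence index. — e.g. on occurences([5, 3], 3): A returns [-1], B returns []
-- outside the precondition, e.g. on occurences([], 3): A raises IndexError, B returns []; on occurences([1, 2, 3, 9, 5], 5): A returns [4], B returns []; on occurences([1, 2, 3, 9], 5): A returns [], B returns []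
import Mathlib
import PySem

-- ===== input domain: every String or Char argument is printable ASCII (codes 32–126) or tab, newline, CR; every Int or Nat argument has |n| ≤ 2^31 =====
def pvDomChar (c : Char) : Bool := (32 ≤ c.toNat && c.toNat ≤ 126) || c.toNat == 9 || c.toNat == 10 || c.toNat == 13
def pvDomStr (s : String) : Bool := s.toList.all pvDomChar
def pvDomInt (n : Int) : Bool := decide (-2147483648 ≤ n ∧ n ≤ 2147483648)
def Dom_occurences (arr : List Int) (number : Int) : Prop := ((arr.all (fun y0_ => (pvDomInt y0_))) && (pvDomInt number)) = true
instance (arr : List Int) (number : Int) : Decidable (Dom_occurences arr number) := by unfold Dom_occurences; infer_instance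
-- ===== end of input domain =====

-- B replaces A's degenerate recursive search and sentinel-indexed collection loop by two
-- generator searches (first index with v ≥ number, then the run length of number in the tail
-- slice) and one range — simpler: no recursion, no -1 sentinel, no negative-index wraparound.

-- ===== PORT A =====
-- Python's recursion is unbounded on some inputs (RecursionError); the fuel argument (called with
-- arr.length + 2, enough for every input satisfying Pre_occurences) is a backstop for those.
def binaryRecursive (arr : List Int) (number : Int) : Nat → Int → Int → Int
  | 0, _, _ => -1
  | fuel + 1, left, right =>
    let mid := left + PySem.Int.floordiv right 2
    if (arr.length : Int) ≤ mid ∨ mid < 0 then -1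
    else
      match PySem.List.pyGet? arr mid with
      | none => -1  -- unreachable: the guard above puts mid in range
      | some midNum =>
        if midNum = number then mid
        else if midNum < number then binaryRecursive arr number fuel (mid + 1) right
        else binaryRecursive arr number fuel left (mid - 1)

-- the `while i < len(arr)` collection loop of `occurences`; its iteration count is bounded by
-- arr.length + 1, so fuel arr.length + 2 is never exhausted
def collectA (arr : List Int) (number : Int) : Nat → Int → List Int
  | 0, _ => []
  | fuel + 1, i =>
    if i < (arr.length : Int) then
      match PySem.List.pyGet? arr i with
      | none => []  -- arr[i] raises IndexError in Python (reached only at arr = [], i = -1; outside Pre_)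
      | some v => if v = number then i :: collectA arr number fuel (i + 1) else []
    else []

def occurences (arr : List Int) (number : Int) : List Int :=
  collectA arr number (arr.length + 2) (binaryRecursive arr number (arr.length + 2) 0 0)

-- ===== PORT B =====
-- next((i for i, v in enumerate(l) if p v), default): the lazy generator walks the list with a
-- counter; exhausting it returns the counter, which then equals the Python default (len resp.
-- len - start), so the default needs no separate case.
def firstIdx (p : Int → Bool) : List Int → Int → Int
  | [], i => i
  | v :: rest, i => if p v then i else firstIdx p rest (i + 1)

def occurences_alt (arr : List Int) (number : Int) : List Int :=
  let start := firstIdx (fun v => number ≤ v) arr 0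
  let run := firstIdx (fun v => v ≠ number) (PySem.List.slice arr (some start) none) 0
  PySem.List.pyRange start (start + run) 1

-- ===== PRECONDITION & SPEC =====
-- Pre_ excludes (a) the empty list, on which A's wraparound collection loop raises IndexError, and
-- (b) arrays whose first element ≥ number is strictly greater and sits at a positive index: there
-- A's degenerate mid arithmetic recurses without bound (RecursionError) on most inputs and returns
-- an accidental index of its jumping midpoints on the rest.
def Pre_occurences (arr : List Int) (number : Int) : Prop :=
  arr ≠ [] ∧ ∀ i : Nat, i < arr.length → number ≤ arr.getD i 0 →
    (∀ j : Nat, j < i → arr.getD j 0 < number) → (i = 0 ∨ arr.getD i 0 = number)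
instance (arr : List Int) (number : Int) : Decidable (Pre_occurences arr number) := by
  unfold Pre_occurences; infer_instance

def pvWitness_occurences : List Int × Int := ([1, 2, 2, 3], 2)

-- On non-empty arrays whose first element exceeds number but whose last element equals number, A's
-- failed search yields index -1 and the negative-index wraparound makes A return [-1]; B returns [],
-- the intended value since -1 is not an occurrence index.
def D_occurences (arr : List Int) (number : Int) : Prop :=
  arr ≠ [] ∧ number < arr.getD 0 0 ∧ arr.getLast? = some number
instance (arr : List Int) (number : Int) : Decidable (D_occurences arr number) := by
  unfold D_occurences; infer_instance

def Spec_occurences (arr : List Int) (number : Int) (out : List Int) : Prop :=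
  ¬ D_occurences arr number → out = occurences_alt arr number
instance (arr : List Int) (number : Int) (out : List Int) : Decidable (Spec_occurences arr number out) := by
  unfold Spec_occurences; infer_instance

def pvDiffWitness_occurences : List Int × Int := ([5, 3], 3)
def pvDiffWitnessOut_occurences : (List Int) × (List Int) := ([-1], [])

-- ===== CLAIM (what is proved, stated in full; the proofs are below) =====
def Claim_unchanged_occurences : Prop := ∀ (arr : List Int) (number : Int), Dom_occurences arr number → Pre_occurences arr number → Spec_occurences arr number (occurences arr number)
def Claim_changed_occurences : Prop := Dom_occurences (pvDiffWitness_occurences.1) (pvDiffWitness_occurences.2) ∧ Pre_occurences (pvDiffWitness_occurences.1) (pvDiffWitness_occurences.2) ∧ D_occurences (pvDiffWitness_occurences.1) (pvDiffWitness_occurences.2) ∧ occurences (pvDiffWitness_occurences.1) (pvDiffWitness_occurences.2) = pvDiffWitnessOut_occurences.1 ∧ occurences_alt (pvDiffWitness_occurences.1) (pvDiffWitness_occurences.2) = pvDiffWitnessOut_occurences.2 ∧ pvDiffWitnessOut_occurences.1 ≠ pvDiffWitnessOut_occurences.2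
def Claim_exact_occurences : Prop := ∀ (arr : List Int) (number : Int), Dom_occurences arr number → Pre_occurences arr number → D_occurences arr number → occurences arr number ≠ occurences_alt arr number

-- ===== LEMMAS AND PROOFS =====

-- proof-side reformulations of B as position scans (used only below; not part of either port)
def scanStart (arr : List Int) (number : Int) : Nat → Int → Int
  | 0, start => start
  | fuel + 1, start =>
    if start < (arr.length : Int) then
      match PySem.List.pyGet? arr start with
      | none => start
      | some v => if v < number then scanStart arr number fuel (start + 1) else start
    else start

def scanEnd (arr : List Int) (number : Int) : Nat → Int → Int
  | 0, e => e
  | fuel + 1, e =>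
    if e < (arr.length : Int) then
      match PySem.List.pyGet? arr e with
      | none => e
      | some v => if v = number then scanEnd arr number fuel (e + 1) else e
    else e

theorem scanEnd_ge (arr : List Int) (number : Int) :
    ∀ (f : Nat) (j : Int), j ≤ scanEnd arr number f j := by
  intro f
  induction f with
  | zero => intro j; simp [scanEnd]
  | succ n ih =>
    intro j
    simp only [scanEnd]
    split
    · cases hg : PySem.List.pyGet? arr j with
      | none => simp
      | some v =>
        simp only
        split
        · exact le_trans (by omega) (ih (j + 1))
        · exact le_refl j
    · exact le_refl j

-- the loop of scanEnd does not move when its condition fails at once (any fuel)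
theorem scanEnd_eq_self (arr : List Int) (number : Int) (f : Nat) (j : Int)
    (h : ¬ j < (arr.length : Int) ∨ ∃ v, PySem.List.pyGet? arr j = some v ∧ v ≠ number) :
    scanEnd arr number f j = j := by
  cases f with
  | zero => rfl
  | succ n =>
    rcases h with h | ⟨v, hv, hvne⟩
    · simp only [scanEnd, if_neg h]
    · by_cases hj : j < (arr.length : Int)
      · simp only [scanEnd, if_pos hj, hv, if_neg hvne]
      · simp only [scanEnd, if_neg hj]

-- the loop of scanStart does not move when its condition fails at once (any fuel)
theorem scanStart_eq_self (arr : List Int) (number : Int) (f : Nat) (j : Int)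
    (h : ¬ j < (arr.length : Int) ∨ ∃ v, PySem.List.pyGet? arr j = some v ∧ ¬ v < number) :
    scanStart arr number f j = j := by
  cases f with
  | zero => rfl
  | succ n =>
    rcases h with h | ⟨v, hv, hvne⟩
    · simp only [scanStart, if_neg h]
    · by_cases hj : j < (arr.length : Int)
      · simp only [scanStart, if_pos hj, hv, if_neg hvne]
      · simp only [scanStart, if_neg hj]

-- one-step and stop equations for collectA, with variable fuel (so simp does not over-unfold)
theorem collectA_stop (arr : List Int) (number : Int) (f : Nat) (j : Int)
    (h : ¬ j < (arr.length : Int) ∨ ∃ v, PySem.List.pyGet? arr j = some v ∧ v ≠ number) :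
    collectA arr number f j = [] := by
  cases f with
  | zero => rfl
  | succ n =>
    rcases h with h | ⟨v, hv, hvne⟩
    · simp only [collectA, if_neg h]
    · by_cases hj : j < (arr.length : Int)
      · simp only [collectA, if_pos hj, hv, if_neg hvne]
      · simp only [collectA, if_neg hj]

theorem collectA_step (arr : List Int) (number : Int) (f : Nat) (j : Int)
    (hj : j < (arr.length : Int)) (v : Int) (hv : PySem.List.pyGet? arr j = some v)
    (hveq : v = number) :
    collectA arr number (f + 1) j = j :: collectA arr number f (j + 1) := by
  simp only [collectA, if_pos hj, hv, if_pos hveq]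

theorem scanStart_props (arr : List Int) (number : Int) :
    ∀ (f : Nat) (i : Int), 0 ≤ i → i ≤ (arr.length : Int) →
    ((arr.length : Int) - i).toNat < f →
    i ≤ scanStart arr number f i ∧ scanStart arr number f i ≤ (arr.length : Int) ∧
    (∀ k : Nat, i ≤ (k : Int) → (k : Int) < scanStart arr number f i → arr.getD k 0 < number) ∧
    (scanStart arr number f i < (arr.length : Int) →
      number ≤ arr.getD (scanStart arr number f i).toNat 0) := by
  intro f
  induction f with
  | zero => intro i _ _ hf; omega
  | succ n ih =>
    intro i h0 hle hf
    by_cases hi : i < (arr.length : Int)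
    · have hget := PySem.List.pyGet?_eq_some_getElem arr h0 hi
      by_cases hv : arr[i.toNat] < number
      · have hrec : scanStart arr number (n + 1) i = scanStart arr number n (i + 1) := by
          simp only [scanStart, hget, if_pos hi, if_pos hv]
        obtain ⟨h1, h2, h3, h4⟩ := ih (i + 1) (by omega) (by omega) (by omega)
        rw [hrec]
        refine ⟨by omega, h2, ?_, h4⟩
        intro k hk1 hk2
        by_cases hki : (k : Int) = i
        · have hkn : k = i.toNat := by omega
          rw [hkn, List.getD_eq_getElem arr 0 (by omega)]
          exact hv
        · exact h3 k (by omega) hk2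
      · have hrec : scanStart arr number (n + 1) i = i := by
          simp only [scanStart, hget, if_pos hi, if_neg hv]
        rw [hrec]
        refine ⟨le_refl i, le_of_lt hi, by omega, fun _ => ?_⟩
        rw [List.getD_eq_getElem arr 0 (by omega)]
        omega
    · have hrec : scanStart arr number (n + 1) i = i := by
        simp only [scanStart, if_neg hi]
      rw [hrec]
      exact ⟨le_refl i, hle, by omega, fun h => absurd h hi⟩

-- firstIdx returns its counter plus the found offset: shifting the counter shifts the result
theorem firstIdx_shift (p : Int → Bool) :
    ∀ (l : List Int) (a i : Int), firstIdx p l (a + i) = a + firstIdx p l i := by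
  intro l
  induction l with
  | nil => intro a i; simp [firstIdx]
  | cons v rest ih =>
    intro a i
    simp only [firstIdx]
    by_cases hp : p v
    · simp [hp]
    · rw [if_neg hp, if_neg hp, show a + i + 1 = a + (i + 1) by ring, ih]

-- B's first generator search, read as a position scan from i over arr
theorem firstIdx_ge_eq_scanStart (arr : List Int) (number : Int) :
    ∀ (f : Nat) (i : Int), 0 ≤ i → i ≤ (arr.length : Int) →
    ((arr.length : Int) - i).toNat < f →
    firstIdx (fun v => decide (number ≤ v)) (arr.drop i.toNat) i = scanStart arr number f i := by
  intro f
  induction f with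
  | zero => intro i _ _ hf; omega
  | succ n ih =>
    intro i h0 hle hf
    by_cases hi : i < (arr.length : Int)
    · have hget := PySem.List.pyGet?_eq_some_getElem arr h0 hi
      have hdrop : arr.drop i.toNat = arr[i.toNat] :: arr.drop (i.toNat + 1) :=
        List.drop_eq_getElem_cons (by omega)
      rw [hdrop]
      simp only [firstIdx, scanStart, hget, if_pos hi]
      by_cases hv : arr[i.toNat] < number
      · rw [if_neg (by simpa using (by omega : ¬ number ≤ arr[i.toNat])), if_pos hv,
          show i.toNat + 1 = (i + 1).toNat by omega]
        exact ih (i + 1) (by omega) (by omega) (by omega)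
      · rw [if_pos (by simpa using (by omega : number ≤ arr[i.toNat])), if_neg hv]
    · have hd : arr.drop i.toNat = [] := List.drop_eq_nil_of_le (by omega)
      rw [hd]
      simp only [firstIdx, scanStart, if_neg hi]

-- B's second generator search, read as a position scan from j over arr
theorem firstIdx_ne_eq_scanEnd (arr : List Int) (number : Int) :
    ∀ (f : Nat) (j : Int), 0 ≤ j → j ≤ (arr.length : Int) →
    ((arr.length : Int) - j).toNat < f →
    firstIdx (fun v => decide (v ≠ number)) (arr.drop j.toNat) j = scanEnd arr number f j := by
  intro f
  induction f with
  | zero => intro j _ _ hf; omega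
  | succ n ih =>
    intro j h0 hle hf
    by_cases hj : j < (arr.length : Int)
    · have hget := PySem.List.pyGet?_eq_some_getElem arr h0 hj
      have hdrop : arr.drop j.toNat = arr[j.toNat] :: arr.drop (j.toNat + 1) :=
        List.drop_eq_getElem_cons (by omega)
      rw [hdrop]
      simp only [firstIdx, scanEnd, hget, if_pos hj]
      by_cases hv : arr[j.toNat] = number
      · rw [if_neg (by simp [hv]), if_pos hv, show j.toNat + 1 = (j + 1).toNat by omega]
        exact ih (j + 1) (by omega) (by omega) (by omega)
      · rw [if_pos (by simp [hv]), if_neg hv]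
    · have hd : arr.drop j.toNat = [] := List.drop_eq_nil_of_le (by omega)
      rw [hd]
      simp only [firstIdx, scanEnd, if_neg hj]

-- B as a whole, re-expressed with the two position scans
theorem alt_eq_scans (arr : List Int) (number : Int) :
    occurences_alt arr number =
      PySem.List.pyRange (scanStart arr number (arr.length + 1) 0)
        (scanEnd arr number (arr.length + 1) (scanStart arr number (arr.length + 1) 0)) 1 := by
  obtain ⟨hS0, hSL, -, -⟩ :=
    scanStart_props arr number (arr.length + 1) 0 (le_refl 0) (by omega) (by omega)
  have hstart : firstIdx (fun v => decide (number ≤ v)) arr 0 =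
      scanStart arr number (arr.length + 1) 0 := by
    have := firstIdx_ge_eq_scanStart arr number (arr.length + 1) 0 (le_refl 0) (by omega) (by omega)
    simpa using this
  show PySem.List.pyRange (firstIdx (fun v => decide (number ≤ v)) arr 0)
      (firstIdx (fun v => decide (number ≤ v)) arr 0 +
        firstIdx (fun v => decide (v ≠ number))
          (PySem.List.slice arr (some (firstIdx (fun v => decide (number ≤ v)) arr 0)) none) 0) 1 = _
  rw [hstart, PySem.List.slice_from arr hS0]
  rw [show scanStart arr number (arr.length + 1) 0 +
        firstIdx (fun v => decide (v ≠ number)) (arr.drop (scanStart arr number (arr.length + 1) 0).toNat) 0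
      = firstIdx (fun v => decide (v ≠ number)) (arr.drop (scanStart arr number (arr.length + 1) 0).toNat)
          (scanStart arr number (arr.length + 1) 0 + 0) from
    (firstIdx_shift _ _ _ 0).symm, add_zero]
  rw [firstIdx_ne_eq_scanEnd arr number (arr.length + 1) _ hS0 hSL (by omega)]

theorem binRec_eq (arr : List Int) (number : Int) (hpre : Pre_occurences arr number) :
    ∀ (fb fs : Nat) (i : Int), 0 ≤ i → i ≤ (arr.length : Int) →
    ((arr.length : Int) - i).toNat + 2 ≤ fb → ((arr.length : Int) - i).toNat < fs →
    (∀ k : Nat, (k : Int) < i → arr.getD k 0 < number) →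
    binaryRecursive arr number fb i 0 =
      (if scanStart arr number fs i < (arr.length : Int) ∧
          arr.getD (scanStart arr number fs i).toNat 0 = number
       then scanStart arr number fs i else -1) := by
  intro fb
  induction fb with
  | zero => intro fs i _ _ hf _ _; omega
  | succ b ih =>
    intro fs i h0 hle hfb hfs hpref
    cases fs with
    | zero => omega
    | succ s =>
      have hmid : i + PySem.Int.floordiv 0 2 = i := by
        norm_num [show PySem.Int.floordiv 0 2 = 0 from rfl]
      by_cases hi : i < (arr.length : Int)
      · have hget := PySem.List.pyGet?_eq_some_getElem arr h0 hi
        by_cases hv : arr[i.toNat] = number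
        · have hbr : binaryRecursive arr number (b + 1) i 0 = i := by
            simp only [binaryRecursive, hmid, hget, if_neg (by omega : ¬((arr.length : Int) ≤ i ∨ i < 0)),
              if_pos hv]
          have hsc : scanStart arr number (s + 1) i = i := by
            simp only [scanStart, hget, if_pos hi, if_neg (by omega : ¬arr[i.toNat] < number)]
          rw [hbr, hsc, if_pos ⟨hi, by rw [List.getD_eq_getElem arr 0 (by omega)]; exact hv⟩]
        · by_cases hlt : arr[i.toNat] < number
          · have hbr : binaryRecursive arr number (b + 1) i 0 =
                binaryRecursive arr number b (i + 1) 0 := by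
              simp only [binaryRecursive, hmid, hget,
                if_neg (by omega : ¬((arr.length : Int) ≤ i ∨ i < 0)), if_neg hv, if_pos hlt]
            have hsc : scanStart arr number (s + 1) i = scanStart arr number s (i + 1) := by
              simp only [scanStart, hget, if_pos hi, if_pos hlt]
            rw [hbr, hsc]
            apply ih s (i + 1) (by omega) (by omega) (by omega) (by omega)
            intro k hk
            by_cases hki : (k : Int) = i
            · have hkn : k = i.toNat := by omega
              rw [hkn, List.getD_eq_getElem arr 0 (by omega)]
              exact hlt
            · exact hpref k (by omega)
          · -- arr[i] > number: by Pre_ and the all-smaller prefix, i must be 0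
            have hgD : arr.getD i.toNat 0 = arr[i.toNat] := List.getD_eq_getElem arr 0 (by omega)
            have hiz : i = 0 := by
              rcases hpre.2 i.toNat (by omega) (by rw [hgD]; omega)
                (fun j hj => hpref j (by omega)) with h | h
              · omega
              · rw [hgD] at h; exact absurd h hv
            subst hiz
            have hbr : binaryRecursive arr number (b + 1) 0 0 =
                binaryRecursive arr number b 0 (-1) := by
              simp only [binaryRecursive, hmid, hget,
                if_neg (by omega : ¬((arr.length : Int) ≤ (0:Int) ∨ (0:Int) < 0)), if_neg hv,
                if_neg hlt]
              norm_num
            have hb1 : ∃ b', b = b' + 1 := ⟨b - 1, by omega⟩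
            obtain ⟨b', rfl⟩ := hb1
            have hbr2 : binaryRecursive arr number (b' + 1) 0 (-1) = -1 := by
              simp only [binaryRecursive]
              rw [if_pos]
              norm_num [show PySem.Int.floordiv (-1) 2 = -1 from rfl]
            have hsc : scanStart arr number (s + 1) 0 = 0 := by
              simp only [scanStart, hget, if_pos hi, if_neg hlt]
            rw [hbr, hbr2, hsc, if_neg]
            rintro ⟨-, h⟩
            rw [show arr.getD (Int.toNat 0) 0 = arr[Int.toNat 0] from
              List.getD_eq_getElem arr 0 (by omega)] at h
            exact hv h
      · have hbr : binaryRecursive arr number (b + 1) i 0 = -1 := by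
          simp only [binaryRecursive, hmid]
          rw [if_pos (by omega)]
        have hsc : scanStart arr number (s + 1) i = i := by
          simp only [scanStart, if_neg hi]
        rw [hbr, hsc, if_neg (by omega)]

theorem collectA_eq_range (arr : List Int) (number : Int) :
    ∀ (fc fe : Nat) (j : Int), 0 ≤ j →
    ((arr.length : Int) - j).toNat < fc → ((arr.length : Int) - j).toNat < fe →
    collectA arr number fc j = PySem.List.pyRange j (scanEnd arr number fe j) 1 := by
  intro fc
  induction fc with
  | zero => intro fe j _ hf _; omega
  | succ c ih =>
    intro fe j h0 hfc hfe
    cases fe with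
    | zero => omega
    | succ e =>
      by_cases hj : j < (arr.length : Int)
      · have hget := PySem.List.pyGet?_eq_some_getElem arr h0 hj
        by_cases hv : arr[j.toNat] = number
        · have hcol : collectA arr number (c + 1) j = j :: collectA arr number c (j + 1) := by
            simp only [collectA, hget, if_pos hj, if_pos hv]
          have hse : scanEnd arr number (e + 1) j = scanEnd arr number e (j + 1) := by
            simp only [scanEnd, hget, if_pos hj, if_pos hv]
          have hge := scanEnd_ge arr number e (j + 1)
          rw [hcol, hse, ih e (j + 1) (by omega) (by omega) (by omega),
            PySem.List.pyRange_one_cons (by omega : j < scanEnd arr number e (j + 1))]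
        · have hcol : collectA arr number (c + 1) j = [] := by
            simp only [collectA, hget, if_pos hj, if_neg hv]
          have hse : scanEnd arr number (e + 1) j = j := by
            simp only [scanEnd, hget, if_pos hj, if_neg hv]
          rw [hcol, hse, PySem.List.pyRange_one_eq_nil (le_refl j)]
      · have hcol : collectA arr number (c + 1) j = [] := by
          simp only [collectA, if_neg hj]
        have hse : scanEnd arr number (e + 1) j = j := by
          simp only [scanEnd, if_neg hj]
        rw [hcol, hse, PySem.List.pyRange_one_eq_nil (le_refl j)]

-- last element of a non-empty list, as pyGet? at -1
theorem pyGet_neg_one_getD (arr : List Int) (h : arr ≠ []) :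
    PySem.List.pyGet? arr (-1) = some (arr.getD (arr.length - 1) 0) := by
  have hl : 0 < arr.length := List.length_pos_iff.mpr h
  rw [PySem.List.pyGet?_neg_one, List.getLast?_eq_getElem?,
    List.getElem?_eq_getElem (by omega), List.getD_eq_getElem arr 0 (by omega)]

-- ===== VERDICT (by name: the statement is the Claim_ definition above) =====
theorem occurences_spec : Claim_unchanged_occurences := by
  intro arr number _ hpre
  unfold Spec_occurences
  intro hnd
  have hne := hpre.1
  have hl : 0 < arr.length := List.length_pos_iff.mpr hne
  have hbin := binRec_eq arr number hpre (arr.length + 2) (arr.length + 1) 0 (le_refl 0)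
    (by omega) (by omega) (by omega) (by intro k hk; omega)
  obtain ⟨hS0, hSL, hpref, hat⟩ :=
    scanStart_props arr number (arr.length + 1) 0 (le_refl 0) (by omega) (by omega)
  have hA : occurences arr number =
      collectA arr number (arr.length + 2) (binaryRecursive arr number (arr.length + 2) 0 0) := rfl
  rw [hA, alt_eq_scans, hbin]
  by_cases hfound : scanStart arr number (arr.length + 1) 0 < (arr.length : Int) ∧
      arr.getD (scanStart arr number (arr.length + 1) 0).toNat 0 = number
  · rw [if_pos hfound]
    exact collectA_eq_range arr number (arr.length + 2) (arr.length + 1)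
      (scanStart arr number (arr.length + 1) 0) hS0 (by omega) (by omega)
  · rw [if_neg hfound]
    have hglast := pyGet_neg_one_getD arr hne
    -- in both not-found cases the last element differs from number and B's range is empty
    have hmain : arr.getD (arr.length - 1) 0 ≠ number ∧
        scanEnd arr number (arr.length + 1) (scanStart arr number (arr.length + 1) 0) =
          scanStart arr number (arr.length + 1) 0 := by
      by_cases hS : scanStart arr number (arr.length + 1) 0 = (arr.length : Int)
      · constructor
        · have := hpref (arr.length - 1) (by omega) (by omega)
          omega
        · exact scanEnd_eq_self arr number _ _ (Or.inl (by omega))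
      · have hSlt : scanStart arr number (arr.length + 1) 0 < (arr.length : Int) := by omega
        have hnum : arr.getD (scanStart arr number (arr.length + 1) 0).toNat 0 ≠ number :=
          fun h => hfound ⟨hSlt, h⟩
        have hge := hat hSlt
        have hSz : (scanStart arr number (arr.length + 1) 0).toNat = 0 := by
          rcases hpre.2 (scanStart arr number (arr.length + 1) 0).toNat (by omega) hge
            (fun j hj => hpref j (by omega) (by omega)) with h | h
          · exact h
          · exact absurd h hnum
        have hSzero : scanStart arr number (arr.length + 1) 0 = 0 := by omega
        have hgD0 : arr.getD 0 0 = arr[Int.toNat 0] := List.getD_eq_getElem arr 0 (by omega)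
        have hget0 := PySem.List.pyGet?_eq_some_getElem arr (le_refl (0:Int)) (by omega)
        have hnum0 : arr.getD 0 0 ≠ number := by rw [hSzero] at hnum; exact hnum
        have hge0 : number ≤ arr.getD 0 0 := by rw [hSzero] at hge; exact hge
        have hne0 : arr[Int.toNat 0] ≠ number := by rw [← hgD0]; exact hnum0
        constructor
        · -- ¬ D_ forces the last element ≠ number
          intro hcon
          apply hnd
          refine ⟨hne, by omega, ?_⟩
          rw [List.getLast?_eq_getElem?, List.getElem?_eq_getElem (by omega),
            ← List.getD_eq_getElem arr 0 (by omega), hcon]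
        · rw [hSzero]
          exact scanEnd_eq_self arr number _ _ (Or.inr ⟨_, hget0, hne0⟩)
    have hcol : collectA arr number (arr.length + 2) (-1) = [] :=
      collectA_stop arr number _ _ (Or.inr ⟨_, hglast, hmain.1⟩)
    rw [hcol, hmain.2, PySem.List.pyRange_one_eq_nil (le_refl _)]

theorem occurences_changed : Claim_changed_occurences := by
  unfold Claim_changed_occurences; decide

theorem occurences_tight : Claim_exact_occurences := by
  intro arr number _ hpre hD
  obtain ⟨hne, hlt0, hlast⟩ := hD
  have hl : 0 < arr.length := List.length_pos_iff.mpr hne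
  have hget0 := PySem.List.pyGet?_eq_some_getElem arr (le_refl (0:Int)) (by omega)
  have hgD0 : arr.getD 0 0 = arr[Int.toNat 0] := List.getD_eq_getElem arr 0 (by omega)
  have hv0ne : ¬ arr[Int.toNat 0] < number := by omega
  have hv0neq : arr[Int.toNat 0] ≠ number := by omega
  have hbin := binRec_eq arr number hpre (arr.length + 2) (arr.length + 1) 0 (le_refl 0)
    (by omega) (by omega) (by omega) (by intro k hk; omega)
  have hsc : scanStart arr number (arr.length + 1) 0 = 0 :=
    scanStart_eq_self arr number _ _ (Or.inr ⟨_, hget0, hv0ne⟩)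
  rw [hsc] at hbin
  have hbin2 : binaryRecursive arr number (arr.length + 2) 0 0 = -1 := by
    rw [hbin, if_neg]
    rintro ⟨-, h⟩
    rw [show arr.getD (Int.toNat 0) 0 = arr[Int.toNat 0] from
      List.getD_eq_getElem arr 0 (by omega)] at h
    exact hv0neq h
  have hglast : PySem.List.pyGet? arr (-1) = some number := by
    rw [PySem.List.pyGet?_neg_one, hlast]
  have hcol0 : collectA arr number (arr.length + 1) 0 = [] :=
    collectA_stop arr number _ _ (Or.inr ⟨_, hget0, hv0neq⟩)
  have hA : occurences arr number = [-1] := by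
    show collectA arr number ((arr.length + 1) + 1) (binaryRecursive arr number (arr.length + 2) 0 0) = [-1]
    rw [hbin2, collectA_step arr number (arr.length + 1) (-1)
      (by omega : (-1:Int) < (arr.length : Int)) number hglast rfl]
    rw [show (-1 : Int) + 1 = 0 by norm_num, hcol0]
  have hB : occurences_alt arr number = [] := by
    rw [alt_eq_scans, hsc, scanEnd_eq_self arr number _ _ (Or.inr ⟨_, hget0, hv0neq⟩),
      PySem.List.pyRange_one_eq_nil (le_refl 0)]
  rw [hA, hB]
  simp
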